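-- pv_equiv track=rewrite | github.com/pgalleguil/procasa-chatbot | audit_leads_summary.py | strongest_intent
-- ===== SOURCE A (Python) =====
-- INTENT_PRIORITY = [
--     "escalado_urgente",
--     "agendar_visita",
--     "contacto_directo",
--     "consultar_precio",
--     "consulta_general"
-- ]
--
-- def strongest_intent(messages):
--     found = set(
--         m.get("intencion")
--         for m in messages
--         if m.get("role") == "assistant" and m.get("intencion")
--     )
--
--     for i in INTENT_PRIORITY:
--         if i in found:
--             return i
--
--     return "consulta_general"
-- ===== SOURCE B (Python) =====
-- INTENT_PRIORITY = [
--     "escalado_urgente",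
--     "agendar_visita",
--     "contacto_directo",
--     "consultar_precio",
--     "consulta_general"
-- ]
--
-- _RANK = {name: i for i, name in enumerate(INTENT_PRIORITY)}
--
-- def strongest_intent(messages):
--     best = len(INTENT_PRIORITY)
--     for m in messages:
--         if m.get("role") == "assistant":
--             r = _RANK.get(m.get("intencion"))
--             if r is not None and r < best:
--                 best = r
--     return INTENT_PRIORITY[best] if best < len(INTENT_PRIORITY) else "consulta_general"
-- ===== Notes on version B (the rewrite author's own statement) =====
-- stated objective: alternative
-- what changed: Replaces A's build-a-set-of-intents-then-scan-the-priority-list with a single min-tracking pass over the messages that keeps only the best rank (an integer) from a precomputed name-to-rank dict.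
import Mathlib
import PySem

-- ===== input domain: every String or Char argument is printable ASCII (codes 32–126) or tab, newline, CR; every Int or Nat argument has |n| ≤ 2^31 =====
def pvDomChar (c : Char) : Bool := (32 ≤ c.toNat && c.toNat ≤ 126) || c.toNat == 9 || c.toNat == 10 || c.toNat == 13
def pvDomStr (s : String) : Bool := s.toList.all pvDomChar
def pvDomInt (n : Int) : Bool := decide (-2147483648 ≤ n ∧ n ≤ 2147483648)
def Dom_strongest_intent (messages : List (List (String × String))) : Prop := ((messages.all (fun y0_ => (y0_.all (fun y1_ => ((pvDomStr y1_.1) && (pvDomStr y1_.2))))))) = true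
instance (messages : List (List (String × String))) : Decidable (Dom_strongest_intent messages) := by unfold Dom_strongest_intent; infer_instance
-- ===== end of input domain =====

-- B replaces A's build-a-set-of-intents-then-scan-the-priority-list by a single
-- min-tracking pass over the messages using a name→rank dict (alternative decomposition).

-- ===== PORT A =====
def INTENT_PRIORITY : List String :=
  ["escalado_urgente", "agendar_visita", "contacto_directo", "consultar_precio", "consulta_general"]

def strongest_intent (messages : List (List (String × String))) : String :=
  let found : PySem.Set String :=
    PySem.Set.ofList (messages.filterMap (fun m =>
      if (PySem.Dict.mk m).get? "role" = some "assistant" then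
        match (PySem.Dict.mk m).get? "intencion" with
        | some s => if s ≠ "" then some s else none
        | none => none
      else none))
  match INTENT_PRIORITY.find? (fun i => PySem.Set.contains found i) with
  | some i => i
  | none => "consulta_general"

-- ===== PORT B =====
def RANK : PySem.Dict String Int :=
  (PySem.List.enumerate INTENT_PRIORITY).foldl (fun d p => d.insert p.2 p.1) PySem.Dict.empty

def strongest_intent_alt (messages : List (List (String × String))) : String :=
  let best : Int := messages.foldl (fun best m =>
    if (PySem.Dict.mk m).get? "role" = some "assistant" then
      match (match (PySem.Dict.mk m).get? "intencion" with
             | some s => RANK.get? s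
             | none => none) with
      | some r => if r < best then r else best
      | none => best
    else best) (INTENT_PRIORITY.length : Int)
  if best < (INTENT_PRIORITY.length : Int) then
    (PySem.List.pyGet? INTENT_PRIORITY best).getD "consulta_general"
  else "consulta_general"

-- ===== PRECONDITION & SPEC =====
def Spec_strongest_intent (messages : List (List (String × String))) (out : String) : Prop := out = strongest_intent_alt messages
instance (messages : List (List (String × String))) (out : String) : Decidable (Spec_strongest_intent messages out) := by unfold Spec_strongest_intent; infer_instance

-- ===== CLAIM (what is proved, stated in full; the proofs are below) =====
def Claim_equal_strongest_intent : Prop := ∀ (messages : List (List (String × String))), Dom_strongest_intent messages → Spec_strongest_intent messages (strongest_intent messages)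

-- ===== LEMMAS AND PROOFS =====

-- the rank a message contributes in B's loop (5 = contributes nothing)
def rankM (m : List (String × String)) : Int :=
  if (PySem.Dict.mk m).get? "role" = some "assistant" then
    (match (PySem.Dict.mk m).get? "intencion" with
     | some s => RANK.get? s
     | none => none).getD 5
  else 5

-- the minimum contributed rank, recursively
def specMin (L : List (List (String × String))) : Int :=
  L.foldr (fun m a => min (rankM m) a) 5

lemma RANK_eq : RANK = PySem.Dict.mk
    [("escalado_urgente", 0), ("agendar_visita", 1), ("contacto_directo", 2),
     ("consultar_precio", 3), ("consulta_general", 4)] := by decide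

-- the k-th priority name, as a function of the rank
def pk (r : Int) : String :=
  if r = 0 then "escalado_urgente" else if r = 1 then "agendar_visita"
  else if r = 2 then "contacto_directo" else if r = 3 then "consultar_precio"
  else "consulta_general"

lemma RANK_get (s : String) :
    RANK.get? s =
      if "escalado_urgente" = s then some 0 else if "agendar_visita" = s then some 1
      else if "contacto_directo" = s then some 2 else if "consultar_precio" = s then some 3
      else if "consulta_general" = s then some 4 else none := by
  rw [RANK_eq]
  simp only [PySem.Dict.get?_mk_cons, beq_iff_eq]
  split_ifs <;> simp [PySem.Dict.get?]

lemma rankM_bounds (m : List (String × String)) : 0 ≤ rankM m ∧ rankM m ≤ 5 := by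
  unfold rankM
  split_ifs
  · cases h : (PySem.Dict.mk m).get? "intencion" with
    | none => simp
    | some s =>
      simp only [RANK_get s]
      split_ifs <;> simp
  · omega

lemma specMin_cons (x : List (String × String)) (t : List (List (String × String))) :
    specMin (x :: t) = min (rankM x) (specMin t) := rfl

lemma specMin_bounds (L : List (List (String × String))) : 0 ≤ specMin L ∧ specMin L ≤ 5 := by
  induction L with
  | nil => simp [specMin]
  | cons m t ih =>
    have h := rankM_bounds m
    rw [specMin_cons]
    exact ⟨le_min h.1 ih.1, le_trans (min_le_right _ _) ih.2⟩

lemma specMin_le (L : List (List (String × String))) (m : List (String × String)) (hm : m ∈ L) :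
    specMin L ≤ rankM m := by
  induction L with
  | nil => cases hm
  | cons x t ih =>
    rw [specMin_cons]
    rcases List.mem_cons.mp hm with h | h
    · subst h; exact min_le_left _ _
    · exact le_trans (min_le_right _ _) (ih h)

lemma specMin_attained (L : List (List (String × String))) :
    specMin L = 5 ∨ ∃ m ∈ L, rankM m = specMin L := by
  induction L with
  | nil => left; rfl
  | cons x t ih =>
    rw [specMin_cons]
    by_cases h : rankM x ≤ specMin t
    · right; exact ⟨x, List.mem_cons_self .., (min_eq_left h).symm⟩
    · rw [min_eq_right (by omega : specMin t ≤ rankM x)]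
      rcases ih with h5 | ⟨m, hm, hr⟩
      · left; exact h5
      · right; exact ⟨m, List.mem_cons_of_mem _ hm, hr⟩

-- B's loop computes min acc (specMin L)
lemma foldl_eq_min (L : List (List (String × String))) (acc : Int) (hacc : acc ≤ 5) :
    L.foldl (fun best m =>
      if (PySem.Dict.mk m).get? "role" = some "assistant" then
        match (match (PySem.Dict.mk m).get? "intencion" with
               | some s => RANK.get? s
               | none => none) with
        | some r => if r < best then r else best
        | none => best
      else best) acc = min acc (specMin L) := by
  induction L generalizing acc with
  | nil => simpa [specMin] using (min_eq_left hacc).symm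
  | cons x t ih =>
    have hbx := rankM_bounds x
    have hstep : (if (PySem.Dict.mk x).get? "role" = some "assistant" then
        match (match (PySem.Dict.mk x).get? "intencion" with
               | some s => RANK.get? s
               | none => none) with
        | some r => if r < acc then r else acc
        | none => acc
      else acc) = min acc (rankM x) := by
      unfold rankM
      split_ifs with h
      · cases hi : (match (PySem.Dict.mk x).get? "intencion" with
               | some s => RANK.get? s
               | none => none) with
        | none =>
          simp only [Option.getD_none]
          exact (min_eq_left hacc).symm
        | some r =>
          simp only [Option.getD_some]
          rw [min_def]
          split_ifs <;> omega
      · exact (min_eq_left hacc).symm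
    rw [List.foldl_cons, hstep,
        ih (min acc (rankM x)) (le_trans (min_le_left _ _) hacc),
        specMin_cons, min_assoc]

-- RANK lookup facts
lemma RANK_get_pk (r : Int) (h0 : 0 ≤ r) (h5 : r < 5) : RANK.get? (pk r) = some r := by
  interval_cases r <;> decide

lemma RANK_get_eq_some (s : String) (r : Int) (h : RANK.get? s = some r) :
    s = pk r ∧ 0 ≤ r ∧ r < 5 := by
  rw [RANK_get] at h
  split_ifs at h with g1 g2 g3 g4 g5
  · cases h; exact ⟨by rw [← g1]; decide, by norm_num⟩
  · cases h; exact ⟨by rw [← g2]; decide, by norm_num⟩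
  · cases h; exact ⟨by rw [← g3]; decide, by norm_num⟩
  · cases h; exact ⟨by rw [← g4]; decide, by norm_num⟩
  · cases h; exact ⟨by rw [← g5]; decide, by norm_num⟩

lemma pk_ne_empty (r : Int) : pk r ≠ "" := by
  unfold pk; split_ifs <;> decide

-- membership in A's found-list characterised by rankM
lemma mem_found_iff (L : List (List (String × String))) (r : Int) (h0 : 0 ≤ r) (h5 : r < 5) :
    (pk r ∈ L.filterMap (fun m =>
      if (PySem.Dict.mk m).get? "role" = some "assistant" then
        match (PySem.Dict.mk m).get? "intencion" with
        | some s => if s ≠ "" then some s else none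
        | none => none
      else none)) ↔ ∃ m ∈ L, rankM m = r := by
  rw [List.mem_filterMap]
  constructor
  · rintro ⟨m, hm, hf⟩
    refine ⟨m, hm, ?_⟩
    unfold rankM
    split_ifs at hf ⊢ with hrole
    · cases hi : (PySem.Dict.mk m).get? "intencion" with
      | none => simp [hi] at hf
      | some s =>
        simp only [hi] at hf ⊢
        split_ifs at hf with hne
        · injection hf with hf'
          subst hf'
          rw [RANK_get_pk r h0 h5]
          rfl
  · rintro ⟨m, hm, hr⟩
    refine ⟨m, hm, ?_⟩
    unfold rankM at hr
    split_ifs at hr with hrole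
    · simp only [if_pos hrole]
      cases hi : (PySem.Dict.mk m).get? "intencion" with
      | none => simp only [hi] at hr; simp at hr; omega
      | some s =>
        simp only [hi] at hr
        cases hg : RANK.get? s with
        | none => rw [hg] at hr; simp at hr; omega
        | some v =>
          rw [hg] at hr
          simp only [Option.getD_some] at hr
          subst hr
          obtain ⟨hs, _, _⟩ := RANK_get_eq_some s v hg
          subst hs
          simp [pk_ne_empty]
    · omega

-- ===== VERDICT (by name: the statement is the Claim_ definition above) =====
theorem strongest_intent_spec : Claim_equal_strongest_intent := by
  intro messages _
  unfold Spec_strongest_intent strongest_intent strongest_intent_alt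
  dsimp only
  have hlen : (INTENT_PRIORITY.length : Int) = 5 := by decide
  rw [hlen, foldl_eq_min messages 5 (by omega)]
  have hb := specMin_bounds messages
  rw [min_eq_right hb.2]
  have hc : ∀ r : Int, 0 ≤ r → r < 5 →
      (PySem.Set.contains (PySem.Set.ofList (messages.filterMap (fun m =>
        if (PySem.Dict.mk m).get? "role" = some "assistant" then
          match (PySem.Dict.mk m).get? "intencion" with
          | some s => if s ≠ "" then some s else none
          | none => none
        else none))) (pk r) = true ↔ ∃ m ∈ messages, rankM m = r) := by
    intro r h0 h5
    rw [PySem.Set.contains_iff, PySem.Set.mem_ofList]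
    exact mem_found_iff messages r h0 h5
  have hfalse : ∀ r : Int, 0 ≤ r → r < specMin messages →
      PySem.Set.contains (PySem.Set.ofList (messages.filterMap (fun m =>
        if (PySem.Dict.mk m).get? "role" = some "assistant" then
          match (PySem.Dict.mk m).get? "intencion" with
          | some s => if s ≠ "" then some s else none
          | none => none
        else none))) (pk r) = false := by
    intro r h0 hr
    apply eq_false_of_ne_true
    intro h
    rcases (hc r h0 (by omega)).mp h with ⟨m, hm, hrm⟩
    have := specMin_le messages m hm
    omega
  rw [show INTENT_PRIORITY = ["escalado_urgente", "agendar_visita", "contacto_directo",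
    "consultar_precio", "consulta_general"] from rfl]
  by_cases hk5 : specMin messages = 5
  · have f0 := hfalse 0 (by omega) (by omega)
    rw [show pk 0 = "escalado_urgente" from by decide] at f0
    have f1 := hfalse 1 (by omega) (by omega)
    rw [show pk 1 = "agendar_visita" from by decide] at f1
    have f2 := hfalse 2 (by omega) (by omega)
    rw [show pk 2 = "contacto_directo" from by decide] at f2
    have f3 := hfalse 3 (by omega) (by omega)
    rw [show pk 3 = "consultar_precio" from by decide] at f3
    have f4 := hfalse 4 (by omega) (by omega)
    rw [show pk 4 = "consulta_general" from by decide] at f4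
    rw [hk5, List.find?_cons_of_neg (by simp only [f0]; decide),
        List.find?_cons_of_neg (by simp only [f1]; decide),
        List.find?_cons_of_neg (by simp only [f2]; decide),
        List.find?_cons_of_neg (by simp only [f3]; decide),
        List.find?_cons_of_neg (by simp only [f4]; decide), List.find?_nil]
    decide
  · have hlt : specMin messages < 5 := by omega
    rcases specMin_attained messages with h | ⟨m, hm, hr⟩
    · omega
    have ht := (hc _ hb.1 hlt).mpr ⟨m, hm, hr⟩
    have h0 := hb.1
    set k := specMin messages with hk
    interval_cases k
    · rw [show pk 0 = "escalado_urgente" from by decide] at ht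
      rw [          List.find?_cons_of_pos (by simp only [ht])]
      decide
    · rw [show pk 1 = "agendar_visita" from by decide] at ht
      have f0 := hfalse 0 (by omega) (by omega)
      rw [show pk 0 = "escalado_urgente" from by decide] at f0
      rw [          List.find?_cons_of_neg (by simp only [f0]; decide),
          List.find?_cons_of_pos (by simp only [ht])]
      decide
    · rw [show pk 2 = "contacto_directo" from by decide] at ht
      have f0 := hfalse 0 (by omega) (by omega)
      rw [show pk 0 = "escalado_urgente" from by decide] at f0
      have f1 := hfalse 1 (by omega) (by omega)
      rw [show pk 1 = "agendar_visita" from by decide] at f1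
      rw [          List.find?_cons_of_neg (by simp only [f0]; decide),
          List.find?_cons_of_neg (by simp only [f1]; decide),
          List.find?_cons_of_pos (by simp only [ht])]
      decide
    · rw [show pk 3 = "consultar_precio" from by decide] at ht
      have f0 := hfalse 0 (by omega) (by omega)
      rw [show pk 0 = "escalado_urgente" from by decide] at f0
      have f1 := hfalse 1 (by omega) (by omega)
      rw [show pk 1 = "agendar_visita" from by decide] at f1
      have f2 := hfalse 2 (by omega) (by omega)
      rw [show pk 2 = "contacto_directo" from by decide] at f2
      rw [          List.find?_cons_of_neg (by simp only [f0]; decide),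
          List.find?_cons_of_neg (by simp only [f1]; decide),
          List.find?_cons_of_neg (by simp only [f2]; decide),
          List.find?_cons_of_pos (by simp only [ht])]
      decide
    · rw [show pk 4 = "consulta_general" from by decide] at ht
      have f0 := hfalse 0 (by omega) (by omega)
      rw [show pk 0 = "escalado_urgente" from by decide] at f0
      have f1 := hfalse 1 (by omega) (by omega)
      rw [show pk 1 = "agendar_visita" from by decide] at f1
      have f2 := hfalse 2 (by omega) (by omega)
      rw [show pk 2 = "contacto_directo" from by decide] at f2
      have f3 := hfalse 3 (by omega) (by omega)
      rw [show pk 3 = "consultar_precio" from by decide] at f3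
      rw [          List.find?_cons_of_neg (by simp only [f0]; decide),
          List.find?_cons_of_neg (by simp only [f1]; decide),
          List.find?_cons_of_neg (by simp only [f2]; decide),
          List.find?_cons_of_neg (by simp only [f3]; decide),
          List.find?_cons_of_pos (by simp only [ht])]
      decide
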